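-- pv_equiv track=rewrite | github.com/klimmm/dash | application/components/dash_table.py | _parse_column_components
-- ===== SOURCE A (Python) =====
-- from typing import List, Dict, Any, Tuple, Optional
--
-- def _parse_column_components(col_id: str, metrics: Dict[str, Dict[str, str]]) -> Tuple[str, str, str]:
--     metric = next((m for m in sorted(metrics.keys(), key=len, reverse=True)
--                    if col_id.startswith(m)), None)
--     if metric:
--         remaining = col_id[len(metric)+1:].split('_')
--         quarter = remaining[0] if remaining else ""
--         additional_info = '_'.join(remaining[1:]) if len(remaining) > 1 else ""
--     else:
--         parts = col_id.split('_')
--         metric, quarter, *additional_parts = parts + ["", ""]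
--         additional_info = '_'.join(additional_parts)
--     return metric, quarter, additional_info
-- ===== SOURCE B (Python) =====
-- def _parse_column_components(col_id, metrics):
--     # single pass over the keys instead of sorting: keep the longest matching prefix
--     best, best_len = None, -1
--     for m in metrics.keys():
--         if len(m) > best_len and col_id.startswith(m):
--             best, best_len = m, len(m)
--     if best:
--         quarter, _, additional_info = col_id[best_len + 1:].partition('_')
--         return best, quarter, additional_info
--     parts = col_id.split('_') + ["", ""]
--     return parts[0], parts[1], '_'.join(parts[2:])
-- ===== Notes on version B (the rewrite author's own statement) =====
-- stated objective: alternative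
-- what changed: The sort-then-first-match metric selection is replaced by a single fold over the dict keys keeping the longest matching prefix (no sort), and the matched-metric tail parsing uses str.partition('_') instead of split('_') plus index/join.
import Mathlib
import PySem

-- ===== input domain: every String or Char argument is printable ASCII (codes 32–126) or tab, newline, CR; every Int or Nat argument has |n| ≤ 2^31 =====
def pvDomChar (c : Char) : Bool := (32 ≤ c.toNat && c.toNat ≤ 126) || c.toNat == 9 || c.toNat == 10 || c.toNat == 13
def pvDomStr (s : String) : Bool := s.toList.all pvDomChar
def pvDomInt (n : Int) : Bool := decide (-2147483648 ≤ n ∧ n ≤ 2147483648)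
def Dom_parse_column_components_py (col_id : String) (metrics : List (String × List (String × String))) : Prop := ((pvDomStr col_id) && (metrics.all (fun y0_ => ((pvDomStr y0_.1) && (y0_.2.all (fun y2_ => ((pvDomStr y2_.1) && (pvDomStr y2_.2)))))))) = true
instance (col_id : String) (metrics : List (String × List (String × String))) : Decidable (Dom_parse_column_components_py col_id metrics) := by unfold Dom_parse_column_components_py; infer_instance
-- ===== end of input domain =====

-- ===== PORT A =====
-- B replaces A's sort-then-first-match metric selection by a single longest-prefix scan
-- and the tail split by str.partition; same return value everywhere (objective: alternative).
def parse_column_components_py (col_id : String) (metrics : List (String × List (String × String))) : String × String × String :=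
  -- dict keys: first-occurrence order, deduplicated
  let keys := PySem.List.dedup (metrics.map Prod.fst)
  -- next((m for m in sorted(metrics.keys(), key=len, reverse=True) if col_id.startswith(m)), None)
  let metric? := (PySem.List.sorted keys (fun m => PySem.Str.len m) true).find?
      (fun m => PySem.Str.startswith col_id m)
  -- `if metric:` — truthy iff Some non-empty string; the else branch rebinds metric, so getD "" is exact
  let metric := metric?.getD ""
  if metric ≠ "" then
    let remaining := PySem.Chars.splitOn
      (PySem.Chars.slice col_id.toList (some (PySem.Str.len metric + 1)) none) ['_']
    let quarter := remaining.headD []            -- remaining[0] if remaining else ""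
    let additional_info :=                       -- '_'.join(remaining[1:]) if len(remaining) > 1 else ""
      if remaining.length > 1 then PySem.Chars.join ['_'] remaining.tail else []
    (metric, String.ofList quarter, String.ofList additional_info)
  else
    -- parts = col_id.split('_');  metric, quarter, *additional_parts = parts + ["", ""]
    let parts := PySem.Chars.splitOn col_id.toList ['_'] ++ [[], []]
    (String.ofList (parts.headD []), String.ofList (parts.tail.headD []),
     String.ofList (PySem.Chars.join ['_'] parts.tail.tail))

-- ===== PORT B =====
-- loop body of Source B's single pass: keep the longest key that is a prefix of col_id
def pvStepB (col_id : String) (acc : Option String × Int) (m : String) : Option String × Int :=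
  if acc.2 < PySem.Str.len m ∧ PySem.Str.startswith col_id m = true
  then (some m, PySem.Str.len m) else acc

-- hand port of str.partition('_') (no PySem primitive): Chars.find is the first index of '_' or -1 — exact
def pvPartitionUnd (cs : List Char) : List Char × List Char :=
  let i := PySem.Chars.find cs ['_']
  if i = -1 then (cs, []) else (cs.take i.toNat, cs.drop (i.toNat + 1))

def parse_column_components_py_alt (col_id : String) (metrics : List (String × List (String × String))) : String × String × String :=
  let keys := PySem.List.dedup (metrics.map Prod.fst)
  let acc := keys.foldl (pvStepB col_id) (none, -1)    -- best, best_len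
  let best := acc.1.getD ""                            -- `if best:` truthiness, as in port A
  if best ≠ "" then
    let pq := pvPartitionUnd (PySem.Chars.slice col_id.toList (some (acc.2 + 1)) none)
    (best, String.ofList pq.1, String.ofList pq.2)
  else
    -- parts = col_id.split('_') + ["", ""];  parts[0], parts[1], '_'.join(parts[2:])
    let parts := PySem.Chars.splitOn col_id.toList ['_'] ++ [[], []]
    (String.ofList (parts.getD 0 []), String.ofList (parts.getD 1 []),
     String.ofList (PySem.Chars.join ['_'] (parts.drop 2)))

-- ===== PRECONDITION & SPEC =====
def Spec_parse_column_components_py (col_id : String) (metrics : List (String × List (String × String))) (out : String × String × String) : Prop := out = parse_column_components_py_alt col_id metrics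
instance (col_id : String) (metrics : List (String × List (String × String))) (out : String × String × String) : Decidable (Spec_parse_column_components_py col_id metrics out) := by unfold Spec_parse_column_components_py; infer_instance

-- ===== CLAIM (what is proved, stated in full; the proofs are below) =====
def Claim_equal_parse_column_components_py : Prop := ∀ (col_id : String) (metrics : List (String × List (String × String))), Dom_parse_column_components_py col_id metrics → Spec_parse_column_components_py col_id metrics (parse_column_components_py col_id metrics)

-- ===== LEMMAS AND PROOFS =====

theorem pv_len_nonneg (m : String) : 0 ≤ PySem.Str.len m := by
  rw [PySem.Str.len_eq]; exact Int.natCast_nonneg _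

-- two prefixes of col_id of equal length are the same string
theorem pv_prefix_unique (col a b : String)
    (ha : PySem.Str.startswith col a = true) (hb : PySem.Str.startswith col b = true)
    (hl : PySem.Str.len a = PySem.Str.len b) : a = b := by
  rw [PySem.Str.startswith_eq, PySem.Chars.startswith_iff] at ha hb
  rw [PySem.Str.len_eq, PySem.Str.len_eq] at hl
  have hlen : a.toList.length = b.toList.length := by exact_mod_cast hl
  exact String.toList_inj.mp
    ((List.prefix_of_prefix_length_le ha hb (le_of_eq hlen)).eq_of_length hlen)

-- invariant of Source B's single pass
theorem pv_fold_spec (col : String) (l : List String) (acc : Option String × Int)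
    (hacc : acc = (none, -1) ∨ ∃ b, acc = (some b, PySem.Str.len b) ∧ PySem.Str.startswith col b = true) :
    (l.foldl (pvStepB col) acc = (none, -1) ∨
      ∃ b, l.foldl (pvStepB col) acc = (some b, PySem.Str.len b) ∧ PySem.Str.startswith col b = true) ∧
    (∀ m ∈ l, PySem.Str.startswith col m = true → PySem.Str.len m ≤ (l.foldl (pvStepB col) acc).2) ∧
    (l.foldl (pvStepB col) acc = acc ∨
      ∃ m ∈ l, l.foldl (pvStepB col) acc = (some m, PySem.Str.len m) ∧ PySem.Str.startswith col m = true) ∧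
    acc.2 ≤ (l.foldl (pvStepB col) acc).2 := by
  induction l generalizing acc with
  | nil => exact ⟨hacc, by simp, Or.inl rfl, le_rfl⟩
  | cons x xs ih =>
    simp only [List.foldl_cons]
    by_cases hx : acc.2 < PySem.Str.len x ∧ PySem.Str.startswith col x = true
    · have hstep : pvStepB col acc x = (some x, PySem.Str.len x) := by
        unfold pvStepB; rw [if_pos hx]
      rw [hstep]
      obtain ⟨h1, h2, h3, h4⟩ := ih (some x, PySem.Str.len x) (Or.inr ⟨x, rfl, hx.2⟩)
      refine ⟨h1, ?_, ?_, ?_⟩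
      · intro m hm hpm
        rcases List.mem_cons.mp hm with rfl | hm
        · exact h4
        · exact h2 m hm hpm
      · rcases h3 with h3 | ⟨m, hm, h3⟩
        · exact Or.inr ⟨x, by simp, h3, hx.2⟩
        · exact Or.inr ⟨m, by simp [hm], h3⟩
      · exact le_trans (le_of_lt hx.1) h4
    · have hstep : pvStepB col acc x = acc := by
        simp only [pvStepB, if_neg hx]
      rw [hstep]
      obtain ⟨h1, h2, h3, h4⟩ := ih acc hacc
      refine ⟨h1, ?_, ?_, h4⟩
      · intro m hm hpm
        rcases List.mem_cons.mp hm with rfl | hm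
        · rcases not_and_or.mp hx with hlt | hps
          · exact le_trans (le_of_not_gt (by simpa using hlt)) h4
          · exact absurd hpm hps
        · exact h2 m hm hpm
      · rcases h3 with h3 | ⟨m, hm, h3⟩
        · exact Or.inl h3
        · exact Or.inr ⟨m, by simp [hm], h3⟩

-- the two metric selections agree (A: first match of the length-descending sort; B: fold)
theorem pv_sel_eq (col : String) (keys : List String) :
    (PySem.List.sorted keys (fun m => PySem.Str.len m) true).find?
        (fun m => PySem.Str.startswith col m)
      = (keys.foldl (pvStepB col) (none, -1)).1 := by
  obtain ⟨h1, h2, h3, -⟩ := pv_fold_spec col keys (none, -1) (Or.inl rfl)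
  rcases h1 with h1 | ⟨b, hb, hpb⟩
  · -- fold found nothing: no key is a prefix (lengths are ≥ 0)
    rw [h1]
    apply List.find?_eq_none.mpr
    intro m hm
    rw [PySem.List.mem_sorted] at hm
    intro hpm
    have h5 := h2 m hm hpm
    rw [h1] at h5
    have h6 := pv_len_nonneg m
    simp at h5
    omega
  · rw [hb]
    have hbmem : b ∈ keys := by
      rcases h3 with h3 | ⟨m, hm, h3, hpm⟩
      · rw [h3] at hb
        exact absurd (congrArg Prod.fst hb) (by simp)
      · rw [h3] at hb
        obtain rfl : m = b := Option.some.inj (congrArg Prod.fst hb)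
        exact hm
    have hmax : ∀ m ∈ keys, PySem.Str.startswith col m = true → PySem.Str.len m ≤ PySem.Str.len b := by
      intro m hm hpm
      have := h2 m hm hpm
      rwa [hb] at this
    -- find? over the sorted list returns some element; show it must be b
    have hbsorted : b ∈ PySem.List.sorted keys (fun m => PySem.Str.len m) true :=
      (PySem.List.mem_sorted ..).mpr hbmem
    rcases hfind : (PySem.List.sorted keys (fun m => PySem.Str.len m) true).find?
        (fun m => PySem.Str.startswith col m) with _ | a
    · exact absurd hpb (by simpa using List.find?_eq_none.mp hfind b hbsorted)
    · obtain ⟨hpa, as, bs, hsplit, hfail⟩ := List.find?_eq_some_iff_append.mp hfind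
      have hamem : a ∈ keys := by
        rw [← PySem.List.mem_sorted keys (fun m => PySem.Str.len m) true, hsplit]; simp
      have hle : PySem.Str.len a ≤ PySem.Str.len b := hmax a hamem hpa
      have hge : PySem.Str.len b ≤ PySem.Str.len a := by
        have hpw := PySem.List.sorted_pairwise_rev keys (fun m => PySem.Str.len m)
        rw [hsplit] at hpw hbsorted
        rcases List.mem_append.mp hbsorted with hbin | hbin
        · exact absurd hpb (by simpa using hfail b hbin)
        · rcases List.mem_cons.mp hbin with hbin | hbin
          · exact le_of_eq (by rw [hbin])
          · exact (List.pairwise_cons.mp (List.pairwise_append.mp hpw).2.1).1 b hbin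
      exact congrArg some (pv_prefix_unique col a b hpa hpb (le_antisymm hle hge))

theorem pv_modifyHead_fun_id {α : Type} (l : List α) : List.modifyHead (fun x => x) l = l := by
  cases l <;> simp

-- PySem's fueled splitOn with a one-character separator is Mathlib's List.splitOn
theorem pv_go_eq (c : Char) : ∀ (fuel : Nat) (l cur : List Char) (acc : List (List Char)),
    l.length < fuel →
    PySem.Chars.splitOn.go [c] fuel l cur acc
      = acc.reverse ++ (List.splitOn c l).modifyHead (cur.reverse ++ ·) := by
  intro fuel
  induction fuel with
  | zero => intro l cur acc h; omega
  | succ fuel ih =>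
    intro l cur acc h
    cases l with
    | nil =>
      simp [PySem.Chars.splitOn.go, List.splitOn]
    | cons ch rest =>
      by_cases hc : ch = c
      · subst hc
        have hpre : [ch].isPrefixOf (ch :: rest) = true := by simp [List.isPrefixOf]
        rw [PySem.Chars.splitOn.go, if_pos hpre]
        rw [ih _ _ _ (by simpa using Nat.lt_of_succ_lt_succ h)]
        simp [List.splitOn, List.splitOnP_cons, pv_modifyHead_fun_id]
      · have hpre : [c].isPrefixOf (ch :: rest) = false := by
          simp [List.isPrefixOf]; exact fun e => hc e.symm
        rw [PySem.Chars.splitOn.go, if_neg (by simp [hpre])]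
        rw [ih _ _ _ (by simpa using Nat.lt_of_succ_lt_succ h)]
        simp [List.splitOn, List.splitOnP_cons, hc, List.modifyHead_modifyHead, Function.comp_def]

theorem pv_splitOn_eq (c : Char) (cs : List Char) :
    PySem.Chars.splitOn cs [c] = List.splitOn c cs := by
  have := pv_go_eq c (cs.length + 1) cs [] [] (by omega)
  simpa [PySem.Chars.splitOn, pv_modifyHead_fun_id] using this

-- the first '_' decomposes Python's split('_')
theorem pv_split_decomp (cs : List Char) :
    (PySem.Chars.find cs ['_'] = -1 ∧ List.splitOn '_' cs = [cs]) ∨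
    (0 ≤ PySem.Chars.find cs ['_'] ∧
      List.splitOn '_' cs
        = cs.take (PySem.Chars.find cs ['_']).toNat
            :: List.splitOn '_' (cs.drop ((PySem.Chars.find cs ['_']).toNat + 1))) := by
  by_cases hf : PySem.Chars.find cs ['_'] = -1
  · left
    refine ⟨hf, ?_⟩
    have hnm : '_' ∉ cs := fun hm =>
      (PySem.Chars.find_eq_neg_one_iff cs ['_']).mp hf ((List.singleton_infix_iff '_' cs).mpr hm)
    rw [List.splitOn]
    exact List.splitOnP_eq_single _ _ (fun x hx => by simp; rintro rfl; exact hnm hx)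
  · right
    have h0 : 0 ≤ PySem.Chars.find cs ['_'] := by
      have := PySem.Chars.neg_one_le_find cs ['_']; omega
    refine ⟨h0, ?_⟩
    obtain ⟨hpre, hmin⟩ := PySem.Chars.find_spec h0
    obtain ⟨t, ht⟩ : ∃ t, cs.drop (PySem.Chars.find cs ['_']).toNat = '_' :: t := by
      rcases hpre with ⟨u, hu⟩; exact ⟨u, hu.symm⟩
    have hdrop1 : cs.drop ((PySem.Chars.find cs ['_']).toNat + 1) = t := by
      rw [← List.tail_drop, ht, List.tail_cons]
    have htake : ∀ x ∈ cs.take (PySem.Chars.find cs ['_']).toNat, ¬(x == '_') = true := by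
      intro x hx hxe
      have hx' : x = '_' := by simpa using hxe
      subst hx'
      obtain ⟨j, hj, hget⟩ := List.getElem_of_mem hx
      have h5 : (cs.take (PySem.Chars.find cs ['_']).toNat).length
          = min (PySem.Chars.find cs ['_']).toNat cs.length := List.length_take
      have hji : j < (PySem.Chars.find cs ['_']).toNat := by omega
      have hjlen : j < cs.length := by omega
      apply hmin j hji
      rw [List.drop_eq_getElem_cons hjlen]
      have hcj : cs[j] = '_' := by
        rw [← hget]; exact List.getElem_take.symm
      rw [hcj]
      exact ⟨cs.drop (j + 1), rfl⟩
    have hcs : cs = cs.take (PySem.Chars.find cs ['_']).toNat ++ '_' :: t := by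
      conv_lhs => rw [← List.take_append_drop (PySem.Chars.find cs ['_']).toNat cs, ht]
    rw [hdrop1]
    conv_lhs => rw [hcs]
    rw [List.splitOn, List.splitOn]
    exact List.splitOnP_first _ _ htake '_' (by simp) t

-- A's split-based then-branch equals B's partition: the head piece …
theorem pv_part_head (cs : List Char) :
    (List.splitOn '_' cs).headD [] = (pvPartitionUnd cs).1 := by
  rcases pv_split_decomp cs with ⟨hf, hs⟩ | ⟨h0, hs⟩
  · simp [hs, pvPartitionUnd, hf]
  · have hne : PySem.Chars.find cs ['_'] ≠ -1 := by omega
    simp [hs, pvPartitionUnd, hne]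

-- … and the joined tail
theorem pv_part_tail (cs : List Char) :
    (if (List.splitOn '_' cs).length > 1
      then PySem.Chars.join ['_'] (List.splitOn '_' cs).tail else [])
      = (pvPartitionUnd cs).2 := by
  rcases pv_split_decomp cs with ⟨hf, hs⟩ | ⟨h0, hs⟩
  · simp [hs, pvPartitionUnd, hf]
  · have hne : PySem.Chars.find cs ['_'] ≠ -1 := by omega
    have hlen : (List.splitOn '_' cs).length > 1 := by
      rw [hs]
      have := List.splitOnP_ne_nil (fun x => x == '_')
        (cs.drop ((PySem.Chars.find cs ['_']).toNat + 1))
      simp only [List.length_cons, gt_iff_lt]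
      have : List.splitOn '_' (cs.drop ((PySem.Chars.find cs ['_']).toNat + 1)) ≠ [] := this
      cases hsp : List.splitOn '_' (cs.drop ((PySem.Chars.find cs ['_']).toNat + 1)) with
      | nil => exact absurd hsp this
      | cons a b => simp
    rw [if_pos hlen, hs]
    simp only [List.tail_cons, pvPartitionUnd, if_neg hne, PySem.Chars.join]
    exact List.intercalate_splitOn _ '_'

-- the two else-branches build the same triple
theorem pv_headD_getD {α : Type} (l : List α) (d : α) : l.headD d = l.getD 0 d := by
  cases l <;> simp
theorem pv_tail_getD {α : Type} (l : List α) (d : α) : l.tail.getD 0 d = l.getD 1 d := by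
  cases l with
  | nil => simp
  | cons a t => cases t <;> simp
theorem pv_tail_tail_drop {α : Type} (l : List α) : l.tail.tail = l.drop 2 := by
  cases l with
  | nil => simp
  | cons a t => cases t <;> simp

-- ===== VERDICT (by name: the statement is the Claim_ definition above) =====
theorem parse_column_components_py_spec : Claim_equal_parse_column_components_py := by
  intro col metrics _
  unfold Spec_parse_column_components_py parse_column_components_py parse_column_components_py_alt
  have hsel := pv_sel_eq col (PySem.List.dedup (metrics.map Prod.fst))
  obtain ⟨hinv, -, -, -⟩ :=
    pv_fold_spec col (PySem.List.dedup (metrics.map Prod.fst)) (none, -1) (Or.inl rfl)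
  rcases hinv with hnone | ⟨b, hb, hpb⟩
  · -- no key matched: both ports take the else branch
    rw [hnone] at hsel
    simp only [hsel, hnone, Option.getD_none, ne_eq, not_true_eq_false, if_false,
      pv_headD_getD, pv_tail_getD, pv_tail_tail_drop]
  · rw [hb] at hsel
    simp only [hsel, hb, Option.getD_some]
    by_cases hbe : b = ""
    · -- the matched key is the empty string: `if metric:` is false in both
      subst hbe
      simp only [ne_eq, not_true_eq_false, if_false,
        pv_headD_getD, pv_tail_getD, pv_tail_tail_drop]
    · -- a non-empty key matched: then-branches, via the split/partition lemmas
      rw [if_pos hbe, if_pos hbe, pv_splitOn_eq, pv_part_head, pv_part_tail]
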